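-- pv_equiv track=rewrite | github.com/drtamermansour/Equine80select_remapper | scripts/qc_filter.py | format_three_d_table
-- ===== SOURCE A (Python) =====
-- def format_three_d_table(three_d):
--     """Format a 3-Dimension Summary (anchor × tie × RefAlt bucket) as a string.
--
--     three_d: dict mapping (anchor, tie) → {"NM_*": int, "refalt_unresolved": int, "N/A": int}
--     """
--     ANCHOR_ORDER = ["topseq_n_probe", "topseq_only", "probe_only", "N/A"]
--     TIE_ORDER    = ["unique", "AS_resolved", "dAS_resolved", "NM_resolved",
--                     "CoordDelta_resolved", "scaffold_resolved", "locus_unresolved", "N/A"]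
--     W = 70
--
--     lines = [
--         "═" * W,
--         "3-Dimension Summary  (anchor × tie × Ref/Alt outcome)  — final markers",
--         "NM_* = any RefAltMethodAgreement value starting with NM_ (NM_match, NM_validated,",
--         "       NM_N/A, NM_tied, NM_only, NM_unmatch, NM_corrected — see algorithm_overview.md)",
--         f"  {'anchor / tie':<28} {'NM_*(Chr≠0)':>10} {'unresolved(Chr=0)':>17}"
--         f" {'not_attempted(Chr=0)':>20} {'Total':>8}",
--         "  " + "─" * 86,
--     ]
--
--     grand = {"NM_*": 0, "refalt_unresolved": 0, "N/A": 0}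
--     for anchor in ANCHOR_ORDER:
--         anchor_data = {t: d for (a, t), d in three_d.items() if a == anchor}
--         if sum(v for d in anchor_data.values() for v in d.values()) == 0:
--             continue
--         lines.append(f"  anchor={anchor}")
--         for tie in TIE_ORDER:
--             d = anchor_data.get(tie, {})
--             nm, amb, na = d.get("NM_*", 0), d.get("refalt_unresolved", 0), d.get("N/A", 0)
--             if nm + amb + na == 0:
--                 continue
--             lines.append(
--                 f"    tie={tie:<24} {nm:>10,} {amb:>17,} {na:>20,} {nm+amb+na:>8,}"
--             )
--             grand["NM_*"] += nm
--             grand["refalt_unresolved"] += amb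
--             grand["N/A"] += na
--
--     total = sum(grand.values())
--     lines += [
--         "  " + "─" * 86,
--         f"  {'Total':<28} {grand['NM_*']:>10,} {grand['refalt_unresolved']:>17,}"
--         f" {grand['N/A']:>20,} {total:>8,}",
--     ]
--     return "\n".join(lines)
-- ===== SOURCE B (Python) =====
-- def format_three_d_table(three_d):
--     """Format a 3-Dimension Summary (anchor × tie × RefAlt bucket) as a string.
--
--     Staged decomposition: (1) one grouping pass over three_d.items() into a
--     by_anchor index, (2) a pure data pass computing the qualifying sections and
--     their nonzero rows as plain tuples, (3) grand totals summed from that row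
--     data, (4) a final rendering pass over the sections.
--     """
--     ANCHOR_ORDER = ["topseq_n_probe", "topseq_only", "probe_only", "N/A"]
--     TIE_ORDER    = ["unique", "AS_resolved", "dAS_resolved", "NM_resolved",
--                     "CoordDelta_resolved", "scaffold_resolved", "locus_unresolved", "N/A"]
--     W = 70
--
--     # (1) group entries by anchor
--     by_anchor = {}
--     for (a, t), d in three_d.items():
--         by_anchor.setdefault(a, {})[t] = d
--
--     # (2) pure row data: per qualifying anchor, its nonzero (tie, nm, amb, na) rows
--     sections = []
--     for anchor in ANCHOR_ORDER:
--         ad = by_anchor.get(anchor, {})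
--         if sum(v for d in ad.values() for v in d.values()) == 0:
--             continue
--         rows = []
--         for tie in TIE_ORDER:
--             d = ad.get(tie, {})
--             nm, amb, na = d.get("NM_*", 0), d.get("refalt_unresolved", 0), d.get("N/A", 0)
--             if nm + amb + na != 0:
--                 rows.append((tie, nm, amb, na))
--         sections.append((anchor, rows))
--
--     # (3) grand totals from the row data
--     g_nm  = sum(r[1] for _, rows in sections for r in rows)
--     g_amb = sum(r[2] for _, rows in sections for r in rows)
--     g_na  = sum(r[3] for _, rows in sections for r in rows)
--
--     # (4) render
--     lines = [
--         "═" * W,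
--         "3-Dimension Summary  (anchor × tie × Ref/Alt outcome)  — final markers",
--         "NM_* = any RefAltMethodAgreement value starting with NM_ (NM_match, NM_validated,",
--         "       NM_N/A, NM_tied, NM_only, NM_unmatch, NM_corrected — see algorithm_overview.md)",
--         f"  {'anchor / tie':<28} {'NM_*(Chr≠0)':>10} {'unresolved(Chr=0)':>17}"
--         f" {'not_attempted(Chr=0)':>20} {'Total':>8}",
--         "  " + "─" * 86,
--     ]
--     for anchor, rows in sections:
--         lines.append(f"  anchor={anchor}")
--         for tie, nm, amb, na in rows:
--             lines.append(
--                 f"    tie={tie:<24} {nm:>10,} {amb:>17,} {na:>20,} {nm+amb+na:>8,}"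
--             )
--     lines.append("  " + "─" * 86)
--     lines.append(f"  {'Total':<28} {g_nm:>10,} {g_amb:>17,} {g_na:>20,} {g_nm+g_amb+g_na:>8,}")
--     return "\n".join(lines)
-- ===== Notes on version B (the rewrite author's own statement) =====
-- stated objective: alternative
-- what changed: B replaces A's single loop that re-filters three_d per anchor while threading the output lines and grand-total dict through one accumulator with a staged pipeline: one grouping pass into a by_anchor index, a pure data pass computing the qualifying sections and their nonzero rows as tuples, grand totals obtained by summing that row data, and a separate final rendering pass; formatting and skip conditions are unchanged.
import Mathlib
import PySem

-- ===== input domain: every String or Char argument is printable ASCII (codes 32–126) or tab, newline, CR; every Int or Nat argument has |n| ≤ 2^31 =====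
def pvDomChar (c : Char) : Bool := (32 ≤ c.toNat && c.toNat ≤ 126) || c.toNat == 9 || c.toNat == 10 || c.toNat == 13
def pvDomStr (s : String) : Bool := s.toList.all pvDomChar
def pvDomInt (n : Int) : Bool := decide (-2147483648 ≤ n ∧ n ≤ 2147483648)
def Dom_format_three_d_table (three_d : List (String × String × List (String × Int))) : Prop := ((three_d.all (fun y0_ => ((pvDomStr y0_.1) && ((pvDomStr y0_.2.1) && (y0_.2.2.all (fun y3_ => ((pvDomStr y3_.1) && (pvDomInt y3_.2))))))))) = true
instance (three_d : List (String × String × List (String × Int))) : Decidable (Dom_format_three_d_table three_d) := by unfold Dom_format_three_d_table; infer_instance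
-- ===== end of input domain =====

-- B replaces A's accumulator loop (per-anchor re-filtering of three_d while threading
-- lines and grand totals) with a staged pipeline: group, compute row data, sum totals,
-- render (objective: alternative).

-- ----- shared helpers modelling the Python f-string formatting both sources use -----
-- f"{n:,}": decimal with ',' every 3 digits
def pvGroup3 : List Char → List Char
  | a :: b :: c :: d :: rest => a :: b :: c :: ',' :: pvGroup3 (d :: rest)
  | l => l

def pvComma (n : Int) : List Char :=
  let s := (PySem.Int.toStr n).toList
  match s with
  | '-' :: ds => '-' :: (pvGroup3 ds.reverse).reverse
  | ds => (pvGroup3 ds.reverse).reverse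

-- f"{s:<w}"
def pvLjust (s : String) (w : Nat) : String :=
  String.ofList (s.toList ++ List.replicate (w - s.toList.length) ' ')

-- d.get(key, 0) on an inner bucket dict (assoc list, first match)
def pvBucketGet (d : List (String × Int)) (key : String) : Int :=
  ((d.find? (fun p => p.1 == key)).map (fun p => p.2)).getD 0

-- the constant header lines (Python's f-strings over literals, folded to the literal result)
def pvHeader : List String :=
  [ "══════════════════════════════════════════════════════════════════════",
    "3-Dimension Summary  (anchor × tie × Ref/Alt outcome)  — final markers",
    "NM_* = any RefAltMethodAgreement value starting with NM_ (NM_match, NM_validated,",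
    "       NM_N/A, NM_tied, NM_only, NM_unmatch, NM_corrected — see algorithm_overview.md)",
    "  anchor / tie                 NM_*(Chr≠0) unresolved(Chr=0) not_attempted(Chr=0)    Total",
    "  ──────────────────────────────────────────────────────────────────────────────────────" ]

def pvSepLine : String :=
  "  ──────────────────────────────────────────────────────────────────────────────────────"

def pvAnchorOrder : List String := ["topseq_n_probe", "topseq_only", "probe_only", "N/A"]
def pvTieOrder : List String :=
  ["unique", "AS_resolved", "dAS_resolved", "NM_resolved",
   "CoordDelta_resolved", "scaffold_resolved", "locus_unresolved", "N/A"]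

-- sum(v for d in anchor_data.values() for v in d.values())
def pvSumAll (anchor_data : PySem.Dict String (List (String × Int))) : Int :=
  ((anchor_data.values.map (fun d => (d.map (fun p => p.2)).sum))).sum

-- ----- A-side helpers -----
-- f"{n:>w,}"
def pvNum (n : Int) (w : Nat) : String :=
  String.ofList (List.replicate (w - (pvComma n).length) ' ' ++ pvComma n)

-- f"    tie={tie:<24} {nm:>10,} {amb:>17,} {na:>20,} {nm+amb+na:>8,}"
def pvRow (tie : String) (nm amb na : Int) : String :=
  "    tie=" ++ pvLjust tie 24 ++ " " ++ pvNum nm 10 ++ " " ++ pvNum amb 17 ++ " " ++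
    pvNum na 20 ++ " " ++ pvNum (nm + amb + na) 8

-- A's inner TIE_ORDER loop: threads (lines, grand) through one accumulator
def pvTieLoop (anchor_data : PySem.Dict String (List (String × Int)))
    (st : List String × Int × Int × Int) : List String × Int × Int × Int :=
  pvTieOrder.foldl (fun st tie =>
    let d := anchor_data.getD tie []
    let nm := pvBucketGet d "NM_*"
    let amb := pvBucketGet d "refalt_unresolved"
    let na := pvBucketGet d "N/A"
    if nm + amb + na == 0 then st
    else (st.1 ++ [pvRow tie nm amb na], st.2.1 + nm, st.2.2.1 + amb, st.2.2.2 + na)) st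

-- f"  {'Total':<28} {…:>10,} {…:>17,} {…:>20,} {…:>8,}"
def pvTotalRow (g1 g2 g3 : Int) : String :=
  "  " ++ pvLjust "Total" 28 ++ " " ++ pvNum g1 10 ++ " " ++ pvNum g2 17 ++ " " ++
    pvNum g3 20 ++ " " ++ pvNum (g1 + g2 + g3) 8

-- ===== PORT A =====
-- for each anchor, anchor_data is the filtering dict comprehension over three_d.items(),
-- and one foldl threads (lines, grand) exactly as A's loop does
def format_three_d_table (three_d : List (String × String × List (String × Int))) : String :=
  let st :=
    pvAnchorOrder.foldl (fun st anchor =>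
      let anchor_data : PySem.Dict String (List (String × Int)) :=
        three_d.foldl (fun m p =>
          if p.1 == anchor then m.insert p.2.1 p.2.2 else m) PySem.Dict.empty
      if pvSumAll anchor_data == 0 then st
      else pvTieLoop anchor_data (st.1 ++ ["  anchor=" ++ anchor], st.2))
      (pvHeader, 0, 0, 0)
  PySem.Str.join "\n" (st.1 ++ [pvSepLine, pvTotalRow st.2.1 st.2.2.1 st.2.2.2])

-- ===== PORT B =====
-- B-side helpers: staged pipeline (group → row data → totals → render)
-- f"{n:>w,}" written as right-justification of the comma form
def bRJust (w : Nat) (l : List Char) : List Char :=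
  List.replicate (w - l.length) ' ' ++ l

def bNum (n : Int) (w : Nat) : String := String.ofList (bRJust w (pvComma n))

-- the nonzero (tie, nm, amb, na) rows of one anchor's data, in TIE_ORDER
def bRows (ad : PySem.Dict String (List (String × Int))) : List (String × Int × Int × Int) :=
  pvTieOrder.filterMap (fun tie =>
    let d := ad.getD tie []
    let nm := pvBucketGet d "NM_*"
    let amb := pvBucketGet d "refalt_unresolved"
    let na := pvBucketGet d "N/A"
    if nm + amb + na == 0 then none else some (tie, nm, amb, na))

-- the qualifying (anchor, rows) sections, in ANCHOR_ORDER
def bSections (by_anchor : PySem.Dict String (PySem.Dict String (List (String × Int)))) :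
    List (String × List (String × Int × Int × Int)) :=
  pvAnchorOrder.filterMap (fun anchor =>
    let ad := by_anchor.getD anchor PySem.Dict.empty
    if pvSumAll ad == 0 then none else some (anchor, bRows ad))

-- 'for _, rows in sections for r in rows'
def bRowData (secs : List (String × List (String × Int × Int × Int))) :
    List (String × Int × Int × Int) :=
  secs.flatMap (fun s => s.2)

def bRowLine (r : String × Int × Int × Int) : String :=
  "    tie=" ++ pvLjust r.1 24 ++ " " ++ bNum r.2.1 10 ++ " " ++ bNum r.2.2.1 17 ++ " " ++
    bNum r.2.2.2 20 ++ " " ++ bNum (r.2.1 + r.2.2.1 + r.2.2.2) 8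

def bRender (secs : List (String × List (String × Int × Int × Int))) : List String :=
  secs.flatMap (fun s => ("  anchor=" ++ s.1) :: s.2.map bRowLine)

def bTotalLine (g1 g2 g3 : Int) : String :=
  "  " ++ pvLjust "Total" 28 ++ " " ++ bNum g1 10 ++ " " ++ bNum g2 17 ++ " " ++
    bNum g3 20 ++ " " ++ bNum (g1 + g2 + g3) 8

-- one grouping pass (by_anchor.setdefault(a, {})[t] = d), then the staged pipeline
def format_three_d_table_alt (three_d : List (String × String × List (String × Int))) : String :=
  let by_anchor : PySem.Dict String (PySem.Dict String (List (String × Int))) :=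
    three_d.foldl (fun m p =>
      m.modify p.1 PySem.Dict.empty (fun sub => sub.insert p.2.1 p.2.2)) PySem.Dict.empty
  let secs := bSections by_anchor
  let rs := bRowData secs
  let gNm := (rs.map (fun r => r.2.1)).sum
  let gAmb := (rs.map (fun r => r.2.2.1)).sum
  let gNa := (rs.map (fun r => r.2.2.2)).sum
  PySem.Str.join "\n"
    (pvHeader ++ bRender secs ++ [pvSepLine, bTotalLine gNm gAmb gNa])

-- ===== PRECONDITION & SPEC =====
def Spec_format_three_d_table (three_d : List (String × String × List (String × Int))) (out : String) : Prop := out = format_three_d_table_alt three_d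
instance (three_d : List (String × String × List (String × Int))) (out : String) : Decidable (Spec_format_three_d_table three_d out) := by unfold Spec_format_three_d_table; infer_instance

-- ===== CLAIM (what is proved, stated in full; the proofs are below) =====
def Claim_equal_format_three_d_table : Prop := ∀ (three_d : List (String × String × List (String × Int))), Dom_format_three_d_table three_d → Spec_format_three_d_table three_d (format_three_d_table three_d)

-- ===== LEMMAS AND PROOFS =====

-- A's row formatter and B's agree (both model the same f-string)
theorem pvRow_eq_bRowLine (tie : String) (nm amb na : Int) :
    pvRow tie nm amb na = bRowLine (tie, nm, amb, na) := rfl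

-- the grouped index, looked up at one anchor, is exactly A's filtering comprehension
theorem pv_group_getD (l : List (String × String × List (String × Int)))
    (M : PySem.Dict String (PySem.Dict String (List (String × Int)))) (anchor : String) :
    (l.foldl (fun m p =>
        m.modify p.1 PySem.Dict.empty (fun sub => sub.insert p.2.1 p.2.2)) M).getD anchor PySem.Dict.empty
      = l.foldl (fun m p => if p.1 == anchor then m.insert p.2.1 p.2.2 else m)
          (M.getD anchor PySem.Dict.empty) := by
  induction l generalizing M with
  | nil => rfl
  | cons p rest ih =>
    simp only [List.foldl_cons]
    rw [ih]
    by_cases h : p.1 = anchor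
    · subst h
      rw [PySem.Dict.getD_modify_self]
      simp
    · rw [PySem.Dict.getD_modify_of_ne]
      · simp [beq_iff_eq, h]
      · exact fun hh => h hh.symm

-- A's accumulator loop over any tie list equals "render + sum" of B's filtered row data
theorem pv_tieFold_staged (ts : List String) (ad : PySem.Dict String (List (String × Int)))
    (lines : List String) (g1 g2 g3 : Int) :
    (ts.foldl (fun st tie =>
        let d := ad.getD tie []
        let nm := pvBucketGet d "NM_*"
        let amb := pvBucketGet d "refalt_unresolved"
        let na := pvBucketGet d "N/A"
        if nm + amb + na == 0 then st
        else (st.1 ++ [pvRow tie nm amb na], st.2.1 + nm, st.2.2.1 + amb, st.2.2.2 + na))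
      (lines, g1, g2, g3))
    = (let rs := ts.filterMap (fun tie =>
          let d := ad.getD tie []
          let nm := pvBucketGet d "NM_*"
          let amb := pvBucketGet d "refalt_unresolved"
          let na := pvBucketGet d "N/A"
          if nm + amb + na == 0 then none else some (tie, nm, amb, na))
       (lines ++ rs.map bRowLine,
        g1 + (rs.map (fun r => r.2.1)).sum,
        g2 + (rs.map (fun r => r.2.2.1)).sum,
        g3 + (rs.map (fun r => r.2.2.2)).sum)) := by
  induction ts generalizing lines g1 g2 g3 with
  | nil => simp
  | cons t ts ih =>
    simp only [List.foldl_cons, List.filterMap_cons]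
    by_cases h : pvBucketGet (ad.getD t []) "NM_*" + pvBucketGet (ad.getD t []) "refalt_unresolved"
        + pvBucketGet (ad.getD t []) "N/A" = 0
    · rw [if_pos (beq_iff_eq.mpr h), if_pos (beq_iff_eq.mpr h)]
      exact ih lines g1 g2 g3
    · rw [if_neg (by simpa using h), if_neg (by simpa using h)]
      rw [ih]
      simp [pvRow_eq_bRowLine, List.append_assoc, add_assoc]

-- A's outer loop equals B's staged sections pipeline
theorem pv_anchorFold_staged (as : List String)
    (G : String → PySem.Dict String (List (String × Int)))
    (lines : List String) (g1 g2 g3 : Int) :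
    (as.foldl (fun st anchor =>
        let anchor_data := G anchor
        if pvSumAll anchor_data == 0 then st
        else pvTieLoop anchor_data (st.1 ++ ["  anchor=" ++ anchor], st.2))
      (lines, g1, g2, g3))
    = (let secs := as.filterMap (fun anchor =>
          let ad := G anchor
          if pvSumAll ad == 0 then none else some (anchor, bRows ad))
       (lines ++ bRender secs,
        g1 + ((bRowData secs).map (fun r => r.2.1)).sum,
        g2 + ((bRowData secs).map (fun r => r.2.2.1)).sum,
        g3 + ((bRowData secs).map (fun r => r.2.2.2)).sum)) := by
  induction as generalizing lines g1 g2 g3 with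
  | nil => simp [bRender, bRowData]
  | cons a as ih =>
    simp only [List.foldl_cons, List.filterMap_cons]
    by_cases h : pvSumAll (G a) = 0
    · rw [if_pos (beq_iff_eq.mpr h), if_pos (beq_iff_eq.mpr h)]
      exact ih lines g1 g2 g3
    · rw [if_neg (by simpa using h), if_neg (by simpa using h)]
      rw [show pvTieLoop (G a) (lines ++ ["  anchor=" ++ a], g1, g2, g3)
            = ((lines ++ ["  anchor=" ++ a]) ++ (bRows (G a)).map bRowLine,
               g1 + ((bRows (G a)).map (fun r => r.2.1)).sum,
               g2 + ((bRows (G a)).map (fun r => r.2.2.1)).sum,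
               g3 + ((bRows (G a)).map (fun r => r.2.2.2)).sum)
          from pv_tieFold_staged pvTieOrder (G a) _ _ _ _]
      rw [ih]
      simp [bRender, bRowData, List.append_assoc, add_assoc]

theorem pvTotalRow_eq_bTotalLine (g1 g2 g3 : Int) :
    pvTotalRow g1 g2 g3 = bTotalLine g1 g2 g3 := rfl

theorem format_three_d_table_eq_alt (three_d : List (String × String × List (String × Int))) :
    format_three_d_table three_d = format_three_d_table_alt three_d := by
  unfold format_three_d_table format_three_d_table_alt bSections
  have hG : ∀ anchor : String,
      (three_d.foldl (fun m p =>
        if p.1 == anchor then m.insert p.2.1 p.2.2 else m)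
        (PySem.Dict.empty : PySem.Dict String (List (String × Int))))
      = (three_d.foldl (fun m p =>
          m.modify p.1 PySem.Dict.empty (fun sub => sub.insert p.2.1 p.2.2))
          PySem.Dict.empty).getD anchor PySem.Dict.empty := by
    intro anchor
    rw [pv_group_getD]
    rfl
  simp only [hG]
  rw [pv_anchorFold_staged]
  simp [pvTotalRow_eq_bTotalLine]

-- ===== VERDICT (by name: the statement is the Claim_ definition above) =====
theorem format_three_d_table_spec : Claim_equal_format_three_d_table := by
  intro three_d _
  unfold Spec_format_three_d_table
  exact format_three_d_table_eq_alt three_d
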